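-- pv_equiv track=rewrite | github.com/ethanvert/15112-TP | Scrap.py | isSummish
-- ===== SOURCE A (Python) =====
-- def isSummish(n):
--   if n < 1000:
--     return False
--   while n >= 100:
--     onesDig = n % 10
--     tensDig = n % 100 // 10
--     hundsDig = n % 1000 // 100
--
--     if onesDig != tensDig + hundsDig:
--       return False
--     n //= 10
--   return True
-- ===== SOURCE B (Python) =====
-- def isSummish(n):
--     if n < 1000:
--         return False
--     p, q, *rest = [ord(ch) - 48 for ch in str(n)]
--     for c in rest:
--         if c != p + q:
--             return False
--         p, q = q, c
--     return True
-- ===== Notes on version B (the rewrite author's own statement) =====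
-- stated objective: alternative
-- what changed: B materializes the number as its decimal string once and makes a single forward pass over the digit values carrying the previous two digits in registers, instead of A's while-loop that repeatedly extracts the three low digits with mod/floordiv and shrinks n in place.
import Mathlib
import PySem

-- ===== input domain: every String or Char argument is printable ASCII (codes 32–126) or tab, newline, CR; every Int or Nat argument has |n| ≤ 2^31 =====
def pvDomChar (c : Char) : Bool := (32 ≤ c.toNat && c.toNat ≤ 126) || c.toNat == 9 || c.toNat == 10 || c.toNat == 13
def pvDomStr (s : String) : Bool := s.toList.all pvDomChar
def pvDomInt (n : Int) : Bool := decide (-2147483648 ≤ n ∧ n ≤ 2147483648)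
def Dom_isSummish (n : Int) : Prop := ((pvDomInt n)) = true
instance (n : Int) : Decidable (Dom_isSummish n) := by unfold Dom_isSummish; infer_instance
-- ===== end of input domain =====

-- B rewrites A's destructive mod/div loop as a single forward pass over the decimal string
-- carrying the previous two digits (objective: alternative; same O(d) cost).

-- ===== PORT A =====
-- the `while n >= 100:` loop of A, step for step
def isSummishLoop (n : Int) : Bool :=
  if _h : 100 ≤ n then
    let onesDig := PySem.Int.mod n 10
    let tensDig := PySem.Int.floordiv (PySem.Int.mod n 100) 10
    let hundsDig := PySem.Int.floordiv (PySem.Int.mod n 1000) 100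
    if onesDig ≠ tensDig + hundsDig then false
    else isSummishLoop (PySem.Int.floordiv n 10)
  else true
termination_by n.toNat
decreasing_by
  have h10 : (0:Int) < 10 := by norm_num
  rw [PySem.Int.floordiv_eq_ediv_of_pos h10]
  omega

def isSummish (n : Int) : Bool :=
  if n < 1000 then false else isSummishLoop n

-- ===== PORT B =====
-- the `for c in rest:` loop of B, carrying the last two digits (p, q)
def pvChk2 : Int → Int → List Int → Bool
  | _, _, [] => true
  | p, q, c :: t => if c ≠ p + q then false else pvChk2 q c t

def isSummish_alt (n : Int) : Bool :=
  if n < 1000 then false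
  else
    match (PySem.Int.toStr n).toList.map (fun ch => ((ch.toNat : Int) - 48)) with
    | p :: q :: rest => pvChk2 p q rest
    | _ => true   -- unreachable: n ≥ 1000 has at least four digits

-- ===== PRECONDITION & SPEC =====
def Spec_isSummish (n : Int) (out : Bool) : Prop := out = isSummish_alt n
instance (n : Int) (out : Bool) : Decidable (Spec_isSummish n out) := by unfold Spec_isSummish; infer_instance

-- ===== CLAIM (what is proved, stated in full; the proofs are below) =====
def Claim_equal_isSummish : Prop := ∀ (n : Int), Dom_isSummish n → Spec_isSummish n (isSummish n)

-- ===== LEMMAS AND PROOFS =====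

-- decimal digit characters of m, most significant first (Nat.toDigits without fuel)
def pvDigits (m : Nat) : List Char :=
  if m < 10 then [Nat.digitChar m] else pvDigits (m / 10) ++ [Nat.digitChar (m % 10)]
termination_by m
decreasing_by omega

-- decimal digit values of m as Ints, most significant first
def pvDI (m : Nat) : List Int :=
  if m < 10 then [(m : Int)] else pvDI (m / 10) ++ [((m % 10 : Nat) : Int)]
termination_by m
decreasing_by omega

theorem pvDigits_lt (m : Nat) (h : m < 10) : pvDigits m = [Nat.digitChar m] := by
  rw [pvDigits]; exact if_pos h

theorem pvDigits_ge (m : Nat) (h : ¬ m < 10) :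
    pvDigits m = pvDigits (m / 10) ++ [Nat.digitChar (m % 10)] := by
  rw [pvDigits]; exact if_neg h

theorem pvDI_lt (m : Nat) (h : m < 10) : pvDI m = [(m : Int)] := by
  rw [pvDI]; exact if_pos h

theorem pvDI_ge (m : Nat) (h : ¬ m < 10) :
    pvDI m = pvDI (m / 10) ++ [((m % 10 : Nat) : Int)] := by
  rw [pvDI]; exact if_neg h

theorem pv_core_eq : ∀ (fuel m : Nat) (ds : List Char), m < fuel →
    Nat.toDigitsCore 10 fuel m ds = pvDigits m ++ ds := by
  intro fuel
  induction fuel with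
  | zero => intro m ds h; omega
  | succ f ih =>
    intro m ds h
    rw [Nat.toDigitsCore]
    by_cases h10 : m < 10
    · have h0 : m / 10 = 0 := by omega
      have hmm : m % 10 = m := by omega
      simp [h0, hmm, pvDigits_lt m h10]
    · have hne : ¬ m / 10 = 0 := by omega
      simp only [hne, ite_false]
      rw [ih (m / 10) (Nat.digitChar (m % 10) :: ds) (by omega), pvDigits_ge m h10]
      simp

theorem pv_toDigits_eq (m : Nat) : Nat.toDigits 10 m = pvDigits m := by
  show Nat.toDigitsCore 10 (m + 1) m [] = pvDigits m
  rw [pv_core_eq (m + 1) m [] (by omega)]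
  simp

theorem pv_digitChar_val (k : Nat) (hk : k < 10) :
    ((Nat.digitChar k).toNat : Int) - 48 = (k : Int) := by
  interval_cases k <;> decide

theorem pv_map_pvDigits (m : Nat) :
    (pvDigits m).map (fun ch => ((ch.toNat : Int) - 48)) = pvDI m := by
  induction m using Nat.strong_induction_on with
  | _ m ih =>
    by_cases h10 : m < 10
    · rw [pvDigits_lt m h10, pvDI_lt m h10]
      simp [pv_digitChar_val m h10]
    · rw [pvDigits_ge m h10, pvDI_ge m h10]
      rw [List.map_append, ih (m / 10) (by omega)]
      simp [pv_digitChar_val (m % 10) (by omega)]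

-- the two carried registers after consuming t, starting from (p, q)
theorem pv_chk2_append : ∀ (t : List Int) (p q c : Int),
    pvChk2 p q (t ++ [c]) =
      (pvChk2 p q t &&
        decide (c = (t.foldl (fun s x => (s.2, x)) (p, q)).1
                  + (t.foldl (fun s x => (s.2, x)) (p, q)).2)) := by
  intro t
  induction t with
  | nil =>
    intro p q c
    by_cases h : c = p + q <;> simp [pvChk2, h]
  | cons d t ih =>
    intro p q c
    simp only [List.cons_append, pvChk2, List.foldl]
    by_cases h : d = p + q
    · rw [if_neg (by simp [h]), if_neg (by simp [h]), ih]
      rfl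
    · rw [if_pos (by simp [h]), if_pos (by simp [h])]
      simp

theorem pv_last2 : ∀ m : Nat, 10 ≤ m → ∃ p q t, pvDI m = p :: q :: t ∧
    t.foldl (fun s x => (s.2, x)) (p, q) = (((m / 10 % 10 : Nat) : Int), ((m % 10 : Nat) : Int)) := by
  intro m
  induction m using Nat.strong_induction_on with
  | _ m ih =>
    intro hm
    by_cases h100 : m < 100
    · refine ⟨((m / 10 : Nat) : Int), ((m % 10 : Nat) : Int), [], ?_, ?_⟩
      · rw [pvDI_ge m (by omega), pvDI_lt (m / 10) (by omega)]
        simp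
      · have hd : m / 10 % 10 = m / 10 := by omega
        simp [List.foldl, hd]
    · obtain ⟨p, q, t, h1, h2⟩ := ih (m / 10) (by omega) (by omega)
      refine ⟨p, q, t ++ [((m % 10 : Nat) : Int)], ?_, ?_⟩
      · rw [pvDI_ge m (by omega), h1]
        simp
      · rw [List.foldl_append, h2]
        simp [List.foldl]

-- B's loop, applied to an arbitrary digit-value list
def pvChk : List Int → Bool
  | p :: q :: t => pvChk2 p q t
  | _ => true

theorem pv_loop_eq : ∀ m : Nat, isSummishLoop (m : Int) = pvChk (pvDI m) := by
  intro m
  induction m using Nat.strong_induction_on with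
  | _ m ih =>
    by_cases h100 : m < 100
    · rw [isSummishLoop]
      rw [dif_neg (by exact_mod_cast (by omega : ¬ 100 ≤ (m : Int)))]
      by_cases h10 : m < 10
      · rw [pvDI_lt m h10]; rfl
      · rw [pvDI_ge m h10, pvDI_lt (m / 10) (by omega)]
        rfl
    · obtain ⟨p, q, t, h1, h2⟩ := pv_last2 (m / 10) (by omega)
      have hDI : pvDI m = p :: q :: (t ++ [((m % 10 : Nat) : Int)]) := by
        rw [pvDI_ge m (by omega), h1]; simp
      rw [isSummishLoop]
      rw [dif_pos (by exact_mod_cast (by omega : (100 : Nat) ≤ m))]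
      simp only [PySem.Int.mod_eq_emod_of_pos (by norm_num : (0:Int) < 10),
        PySem.Int.mod_eq_emod_of_pos (by norm_num : (0:Int) < 100),
        PySem.Int.mod_eq_emod_of_pos (by norm_num : (0:Int) < 1000),
        PySem.Int.floordiv_eq_ediv_of_pos (by norm_num : (0:Int) < 10),
        PySem.Int.floordiv_eq_ediv_of_pos (by norm_num : (0:Int) < 100)]
      have hdiv : ((m : Int) / 10) = ((m / 10 : Nat) : Int) := by omega
      have hrec : isSummishLoop (((m / 10 : Nat) : Nat) : Int) = pvChk2 p q t := by
        rw [ih (m / 10) (by omega), h1]; rfl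
      have h2' : t.foldl (fun s x => (s.2, x)) (p, q)
          = (((m / 100 % 10 : Nat) : Int), ((m / 10 % 10 : Nat) : Int)) := by
        rw [h2]
        have ea : m / 10 / 10 % 10 = m / 100 % 10 := by omega
        have eb : m / 10 % 10 = m / 10 % 10 := rfl
        rw [ea]
      rw [hDI, hdiv]
      show (if (m : Int) % 10 ≠ (m : Int) % 100 / 10 + (m : Int) % 1000 / 100
            then false else isSummishLoop (((m / 10 : Nat) : Nat) : Int))
          = pvChk2 p q (t ++ [((m % 10 : Nat) : Int)])
      have e1 : ((m : Int)) % 10 = ((m % 10 : Nat) : Int) := by omega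
      have e2 : ((m : Int)) % 100 = ((m % 100 : Nat) : Int) := by omega
      have e3 : ((m : Int)) % 1000 = ((m % 1000 : Nat) : Int) := by omega
      have e4 : ((m % 100 : Nat) : Int) / 10 = ((m % 100 / 10 : Nat) : Int) := by omega
      have e5 : ((m % 1000 : Nat) : Int) / 100 = ((m % 1000 / 100 : Nat) : Int) := by omega
      have e6 : m % 100 / 10 = m / 10 % 10 := by omega
      have e7 : m % 1000 / 100 = m / 100 % 10 := by omega
      rw [e1, e2, e3, e4, e5, e6, e7]
      rw [pv_chk2_append, h2', hrec]
      by_cases hc : m % 10 = m / 10 % 10 + m / 100 % 10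
      · have hA : ¬ ((m % 10 : Nat) : Int) ≠ ((m / 10 % 10 : Nat) : Int) + ((m / 100 % 10 : Nat) : Int) := by
          simp only [ne_eq, not_not]; exact_mod_cast hc
        have hBn : m % 10 = m / 100 % 10 + m / 10 % 10 := by omega
        have hB : ((m % 10 : Nat) : Int) = ((m / 100 % 10 : Nat) : Int) + ((m / 10 % 10 : Nat) : Int) := by
          exact_mod_cast hBn
        rw [if_neg hA]
        simp [hB]
      · have hA : ((m % 10 : Nat) : Int) ≠ ((m / 10 % 10 : Nat) : Int) + ((m / 100 % 10 : Nat) : Int) := by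
          intro hx; apply hc; exact_mod_cast hx
        have hB : ¬ ((m % 10 : Nat) : Int) = ((m / 100 % 10 : Nat) : Int) + ((m / 10 % 10 : Nat) : Int) := by
          intro hx
          have hxn : m % 10 = m / 100 % 10 + m / 10 % 10 := by exact_mod_cast hx
          omega
        have hB' : ¬ ((m : Int) % 10 = (m : Int) / 100 % 10 + (m : Int) / 10 % 10) := by
          clear e1 e2 e3 e4 e5 hA hB hdiv
          omega
        rw [if_pos hA]
        simp [hB']

-- ===== VERDICT (by name: the statement is the Claim_ definition above) =====
theorem isSummish_spec : Claim_equal_isSummish := by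
  intro n _
  unfold Spec_isSummish isSummish isSummish_alt
  by_cases h : n < 1000
  · simp [h]
  · rw [if_neg h, if_neg h]
    have hn0 : ¬ n < 0 := by omega
    have hchars : (PySem.Int.toStr n).toList = Nat.toDigits 10 n.toNat := by
      rw [PySem.Int.toList_toStr]
      simp [PySem.Int.toChars, hn0]
    rw [hchars, pv_toDigits_eq, pv_map_pvDigits]
    have hn : n = ((n.toNat : Nat) : Int) := by omega
    rw [hn, pv_loop_eq]
    simp only [Int.toNat_natCast]
    obtain ⟨p, q, t, h1, _⟩ := pv_last2 n.toNat (by omega)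
    rw [h1]
    rfl
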